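-- pv_equiv track=rewrite | github.com/itsUs3/Newest-ARK-Capstone | backend/models/social/report_generator.py | _default_summary
-- ===== SOURCE A (Python) =====
-- from typing import Dict, List
--
-- def _default_summary(area: str, overall_sentiment: str, aspect_analysis: Dict[str, Dict]) -> str:
--     positive_aspects = [name for name, data in aspect_analysis.items() if data.get("label") == "positive"]
--     negative_aspects = [name for name, data in aspect_analysis.items() if data.get("label") == "negative"]
--     mixed_aspects = [name for name, data in aspect_analysis.items() if data.get("label") == "mixed"]
--
--     if not positive_aspects and not negative_aspects and not mixed_aspects:
--         return f"Limited social data available around {area}, so there isn't enough signal to confidently profile the area."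
--
--     # Create more realistic, balanced summaries
--     parts = []
--
--     if positive_aspects:
--         positive_text = ", ".join(positive_aspects[:2]) if len(positive_aspects) <= 2 else f"{positive_aspects[0]} and {positive_aspects[1]}"
--         parts.append(f"People praise {positive_text}")
--
--     if negative_aspects:
--         negative_text = ", ".join(negative_aspects[:2]) if len(negative_aspects) <= 2 else f"{negative_aspects[0]} and {negative_aspects[1]}"
--         parts.append(f"but express concerns around {negative_text}")
--
--     if mixed_aspects and not negative_aspects:
--         mixed_text = ", ".join(mixed_aspects[:1])
--         parts.append(f"discussions are mixed on {mixed_text}")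
--
--     if not parts:
--         return f"Mixed opinions about {area} with no clear consensus in available discussions."
--
--     summary = ". ".join(parts) + "."
--     return f"Reddit conversations paint a nuanced picture of {area}. {summary}"
-- ===== SOURCE B (Python) =====
-- def _default_summary(area: str, overall_sentiment: str, aspect_analysis) -> str:
--     # Bounded-state single pass: keep only per-label counters and the first two
--     # names per label (the only names the summary can mention), then build the
--     # summary by direct concatenation with a separator accumulator -- no full
--     # per-label lists and no parts-list join.
--     pc = nc = mc = 0
--     p2, n2, m1 = [], [], ""
--     for name, data in aspect_analysis.items():
--         lbl = data.get("label")
--         if lbl == "positive":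
--             pc += 1
--             if pc <= 2:
--                 p2.append(name)
--         elif lbl == "negative":
--             nc += 1
--             if nc <= 2:
--                 n2.append(name)
--         elif lbl == "mixed":
--             mc += 1
--             if mc == 1:
--                 m1 = name
--
--     if pc == 0 and nc == 0 and mc == 0:
--         return f"Limited social data available around {area}, so there isn't enough signal to confidently profile the area."
--
--     def pair_text(two, count):
--         return ", ".join(two) if count <= 2 else f"{two[0]} and {two[1]}"
--
--     summary = f"Reddit conversations paint a nuanced picture of {area}. "
--     sep = ""
--     if pc:
--         summary += f"People praise {pair_text(p2, pc)}"
--         sep = ". "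
--     if nc:
--         summary += sep + f"but express concerns around {pair_text(n2, nc)}"
--     elif mc:
--         summary += sep + f"discussions are mixed on {m1}"
--     return summary + "."
-- ===== Notes on version B (the rewrite author's own statement) =====
-- stated objective: alternative
-- what changed: B replaces A's three label-filtering comprehensions and parts-list join by a single bounded-state pass that maintains only per-label counters and the first two names per label (constant extra memory, the only names the output can mention) and builds the summary string directly with a separator accumulator.
import Mathlib
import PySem

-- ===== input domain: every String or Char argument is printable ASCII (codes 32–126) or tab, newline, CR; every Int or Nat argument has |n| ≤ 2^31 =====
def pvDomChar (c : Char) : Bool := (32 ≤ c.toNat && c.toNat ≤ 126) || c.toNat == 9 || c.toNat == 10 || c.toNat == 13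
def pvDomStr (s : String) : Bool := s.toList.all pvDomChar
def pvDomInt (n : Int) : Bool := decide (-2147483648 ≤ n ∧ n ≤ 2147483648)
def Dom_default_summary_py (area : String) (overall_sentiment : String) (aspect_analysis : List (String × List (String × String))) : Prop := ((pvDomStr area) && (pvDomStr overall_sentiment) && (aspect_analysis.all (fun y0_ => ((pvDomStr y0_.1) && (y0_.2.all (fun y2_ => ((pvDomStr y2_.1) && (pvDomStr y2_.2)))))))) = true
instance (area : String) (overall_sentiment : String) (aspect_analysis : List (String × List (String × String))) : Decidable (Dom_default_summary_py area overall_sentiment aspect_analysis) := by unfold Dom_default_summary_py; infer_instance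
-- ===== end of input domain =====

-- B replaces A's three filtering scans and parts-list join by one bounded-state pass
-- (per-label counters + first two names) and direct string concatenation; objective: alternative.

-- shared lookup helper: Python's data.get("label") on the inner dict (first-match assoc-list lookup)
def pvGetLabel (data : List (String × String)) : Option String :=
  (PySem.Dict.mk data).get? "label"

-- ===== PORT A =====
def default_summary_py (area : String) (overall_sentiment : String) (aspect_analysis : List (String × List (String × String))) : String :=
  let positive_aspects := (aspect_analysis.filter (fun p => pvGetLabel p.2 == some "positive")).map (·.1)
  let negative_aspects := (aspect_analysis.filter (fun p => pvGetLabel p.2 == some "negative")).map (·.1)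
  let mixed_aspects := (aspect_analysis.filter (fun p => pvGetLabel p.2 == some "mixed")).map (·.1)
  if positive_aspects.isEmpty && negative_aspects.isEmpty && mixed_aspects.isEmpty then
    "Limited social data available around " ++ area ++ ", so there isn't enough signal to confidently profile the area."
  else
    let parts : List String := []
    let parts := if !positive_aspects.isEmpty then
        parts ++ ["People praise " ++
          (if positive_aspects.length ≤ 2 then PySem.Str.join ", " (PySem.List.slice positive_aspects none (some 2))
           else PySem.List.pyGetD positive_aspects 0 "" ++ " and " ++ PySem.List.pyGetD positive_aspects 1 "")]
      else parts
    let parts := if !negative_aspects.isEmpty then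
        parts ++ ["but express concerns around " ++
          (if negative_aspects.length ≤ 2 then PySem.Str.join ", " (PySem.List.slice negative_aspects none (some 2))
           else PySem.List.pyGetD negative_aspects 0 "" ++ " and " ++ PySem.List.pyGetD negative_aspects 1 "")]
      else parts
    let parts := if !mixed_aspects.isEmpty && negative_aspects.isEmpty then
        parts ++ ["discussions are mixed on " ++ PySem.Str.join ", " (PySem.List.slice mixed_aspects none (some 1))]
      else parts
    if parts.isEmpty then
      "Mixed opinions about " ++ area ++ " with no clear consensus in available discussions."
    else
      "Reddit conversations paint a nuanced picture of " ++ area ++ ". " ++ (PySem.Str.join ". " parts ++ ".")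

-- ===== PORT B =====
-- B's loop body: bounded state (pc, p2, nc, n2, mc, m1)
def pvStep (s : Nat × List String × Nat × List String × Nat × String)
    (p : String × List (String × String)) : Nat × List String × Nat × List String × Nat × String :=
  let (pc, p2, nc, n2, mc, m1) := s
  let lbl := pvGetLabel p.2
  if lbl == some "positive" then
    (pc + 1, if pc + 1 ≤ 2 then p2 ++ [p.1] else p2, nc, n2, mc, m1)
  else if lbl == some "negative" then
    (pc, p2, nc + 1, if nc + 1 ≤ 2 then n2 ++ [p.1] else n2, mc, m1)
  else if lbl == some "mixed" then
    (pc, p2, nc, n2, mc + 1, if mc + 1 = 1 then p.1 else m1)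
  else s

-- B helper: pair_text(two, count)
def pvPairText (two : List String) (count : Nat) : String :=
  if count ≤ 2 then PySem.Str.join ", " two
  else PySem.List.pyGetD two 0 "" ++ " and " ++ PySem.List.pyGetD two 1 ""

def default_summary_py_alt (area : String) (overall_sentiment : String) (aspect_analysis : List (String × List (String × String))) : String :=
  let st := aspect_analysis.foldl pvStep (0, [], 0, [], 0, "")
  let (pc, p2, nc, n2, mc, m1) := st
  if pc = 0 ∧ nc = 0 ∧ mc = 0 then
    "Limited social data available around " ++ area ++ ", so there isn't enough signal to confidently profile the area."
  else
    let summary := "Reddit conversations paint a nuanced picture of " ++ area ++ ". "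
    let (summary, sep) :=
      if pc ≠ 0 then (summary ++ "People praise " ++ pvPairText p2 pc, ". ") else (summary, "")
    let summary :=
      if nc ≠ 0 then summary ++ sep ++ "but express concerns around " ++ pvPairText n2 nc
      else if mc ≠ 0 then summary ++ sep ++ "discussions are mixed on " ++ m1
      else summary
    summary ++ "."

-- ===== PRECONDITION & SPEC =====
def Spec_default_summary_py (area : String) (overall_sentiment : String) (aspect_analysis : List (String × List (String × String))) (out : String) : Prop := out = default_summary_py_alt area overall_sentiment aspect_analysis
instance (area : String) (overall_sentiment : String) (aspect_analysis : List (String × List (String × String))) (out : String) : Decidable (Spec_default_summary_py area overall_sentiment aspect_analysis out) := by unfold Spec_default_summary_py; infer_instance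

-- ===== CLAIM (what is proved, stated in full; the proofs are below) =====
def Claim_equal_default_summary_py : Prop := ∀ (area : String) (overall_sentiment : String) (aspect_analysis : List (String × List (String × String))), Dom_default_summary_py area overall_sentiment aspect_analysis → Spec_default_summary_py area overall_sentiment aspect_analysis (default_summary_py area overall_sentiment aspect_analysis)

-- ===== LEMMAS AND PROOFS =====

-- abbreviations for A's three groups
def pvGrp (k : String) (aa : List (String × List (String × String))) : List String :=
  (aa.filter (fun p => pvGetLabel p.2 == some k)).map (·.1)

-- closed form of B's bounded-state fold from an arbitrary state
theorem pv_fold_spec (aa : List (String × List (String × String)))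
    (pc nc mc : Nat) (p2 n2 : List String) (m1 : String) :
    aa.foldl pvStep (pc, p2, nc, n2, mc, m1) =
      (pc + (pvGrp "positive" aa).length, p2 ++ (pvGrp "positive" aa).take (2 - pc),
       nc + (pvGrp "negative" aa).length, n2 ++ (pvGrp "negative" aa).take (2 - nc),
       mc + (pvGrp "mixed" aa).length,
       if mc = 0 then (pvGrp "mixed" aa).headD m1 else m1) := by
  induction aa generalizing pc nc mc p2 n2 m1 with
  | nil => simp [pvGrp]
  | cons x t ih =>
    by_cases hp : pvGetLabel x.2 = some "positive"
    · have hn : pvGetLabel x.2 ≠ some "negative" := by simp [hp]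
      have hm : pvGetLabel x.2 ≠ some "mixed" := by simp [hp]
      simp only [List.foldl_cons, pvStep, hp, hn, hm, beq_iff_eq, if_true, reduceIte, ih, pvGrp,
        List.filter_cons, List.map_cons]
      rcases pc with _ | _ | pc <;> simp [pvGrp, hp, hn, hm] <;> omega
    · by_cases hn : pvGetLabel x.2 = some "negative"
      · have hm : pvGetLabel x.2 ≠ some "mixed" := by simp [hn]
        simp only [List.foldl_cons, pvStep, hp, hn, hm, beq_iff_eq, reduceIte, ih]
        rcases nc with _ | _ | nc <;> simp [pvGrp, hp, hn, hm] <;> omega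
      · by_cases hm : pvGetLabel x.2 = some "mixed"
        · simp only [List.foldl_cons, pvStep, hp, hn, hm, beq_iff_eq, reduceIte, ih]
          rcases mc with _ | mc <;> simp [pvGrp, hp, hn, hm] <;> omega
        · simp only [List.foldl_cons, pvStep, beq_iff_eq, hp, hn, hm, reduceIte, ih]
          simp [pvGrp, hp, hn, hm]

-- B writes names[0] where A writes ", ".join(names[:1]); equal on nonempty lists
theorem pv_join_slice_one (xs : List String) (h : xs ≠ []) :
    PySem.Str.join ", " (PySem.List.slice xs none (some 1)) = xs.headD "" := by
  obtain ⟨x, t, rfl⟩ := List.exists_cons_of_ne_nil h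
  rw [show ((1:Int)) = ((1:Nat):Int) by norm_num, PySem.List.slice_to_natCast]
  simp [PySem.Str.join, PySem.Chars.join, List.intercalate]

-- ". ".join on one/two parts, as concatenation
theorem pv_join_one (a : String) : PySem.Str.join ". " [a] = a := by
  simp [PySem.Str.join, PySem.Chars.join, List.intercalate]

theorem pv_join_two (a b : String) : PySem.Str.join ". " [a, b] = a ++ ". " ++ b := by
  have h : PySem.Str.join ". " [a, b] = String.ofList ((a ++ (". " ++ b)).toList) := by
    simp [PySem.Str.join, PySem.Chars.join, List.intercalate, String.toList_append]
  rw [h, String.ofList_toList, String.append_assoc]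

-- A's two-name phrase equals B's pair_text on the first-two prefix
theorem pv_pair_text_take (xs : List String) :
    pvPairText (xs.take 2) xs.length =
      (if xs.length ≤ 2 then PySem.Str.join ", " (PySem.List.slice xs none (some 2))
       else PySem.List.pyGetD xs 0 "" ++ " and " ++ PySem.List.pyGetD xs 1 "") := by
  unfold pvPairText
  rw [show ((2:Int)) = ((2:Nat):Int) by norm_num, PySem.List.slice_to_natCast]
  by_cases h : xs.length ≤ 2
  · simp [h, List.take_of_length_le]
  · rcases xs with _ | ⟨a, _ | ⟨b, t⟩⟩
    · simp at h
    · simp at h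
    · simp [PySem.List.pyGetD]

-- ===== VERDICT (by name: the statement is the Claim_ definition above) =====
theorem default_summary_py_spec : Claim_equal_default_summary_py := by
  intro area os aa _
  unfold Spec_default_summary_py default_summary_py default_summary_py_alt
  rw [pv_fold_spec]
  simp only [pvGrp, Nat.zero_add, List.nil_append, Nat.sub_zero]
  set P := (aa.filter (fun p => pvGetLabel p.2 == some "positive")).map (·.1) with hP
  set N := (aa.filter (fun p => pvGetLabel p.2 == some "negative")).map (·.1) with hN
  set M := (aa.filter (fun p => pvGetLabel p.2 == some "mixed")).map (·.1) with hM
  by_cases hp : P = [] <;> by_cases hn : N = [] <;> by_cases hm : M = [] <;>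
    simp [hp, hn, hm, List.isEmpty_iff, pv_join_slice_one, pv_pair_text_take,
      pv_join_one, pv_join_two, List.length_eq_zero_iff, ← String.append_assoc]
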